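-- pv_equiv track=rewrite | github.com/BrianMills2718/autocoder_2025.09 | autocoder_cc/tests/tools/component_analyzer.py | _detect_base_path
-- ===== SOURCE A (Python) =====
-- from typing import Dict, Any, Optional, List
--
-- def _detect_base_path(paths: List[str]) -> str:
--     """Detect the base path from a list of paths"""
--     # Look for the most common base path
--     for path in paths:
--         if path in ["/todos", "/tasks"]:
--             return path
--     # Check for path patterns
--     if any("/todo" in p for p in paths):
--         return "/todos"
--     if any("/task" in p for p in paths):
--         return "/tasks"
--     # Default based on component generation patterns
--     return "/todos"
-- ===== SOURCE B (Python) =====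
-- from typing import List
--
-- def _detect_base_path(paths: List[str]) -> str:
--     """Single pass: return exact match immediately; remember substring hits."""
--     has_todo = False
--     has_task = False
--     for path in paths:
--         if path == "/todos" or path == "/tasks":
--             return path
--         if "/todo" in path:
--             has_todo = True
--         if "/task" in path:
--             has_task = True
--     if has_todo:
--         return "/todos"
--     if has_task:
--         return "/tasks"
--     return "/todos"
-- ===== Notes on version B (the rewrite author's own statement) =====
-- stated objective: faster
-- what changed: Fuses A's three list traversals (early-return scan plus two any() scans) into one pass that returns an exact match immediately and accumulates the two substring flags, deciding from the flags afterwards.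
import Mathlib
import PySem

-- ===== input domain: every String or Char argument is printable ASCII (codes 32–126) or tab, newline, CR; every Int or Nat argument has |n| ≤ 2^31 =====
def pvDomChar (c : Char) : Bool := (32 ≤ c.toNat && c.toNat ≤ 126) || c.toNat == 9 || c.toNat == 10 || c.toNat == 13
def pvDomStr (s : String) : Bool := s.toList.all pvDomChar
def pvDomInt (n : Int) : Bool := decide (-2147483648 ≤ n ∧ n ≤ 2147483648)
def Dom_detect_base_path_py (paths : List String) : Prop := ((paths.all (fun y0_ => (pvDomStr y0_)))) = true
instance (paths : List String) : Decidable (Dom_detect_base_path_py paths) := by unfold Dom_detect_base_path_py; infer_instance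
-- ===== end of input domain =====

-- B fuses A's three traversals into one single pass (early return on exact match,
-- two substring flags otherwise); objective: faster (constant factor, one pass vs up to three).

-- ===== PORT A =====
-- for path in paths: if path in ["/todos","/tasks"]: return path  →  find? on the same predicate;
-- then the two any() scans, in order, and the default.
def detect_base_path_py (paths : List String) : String :=
  match paths.find? (fun p => p == "/todos" || p == "/tasks") with
  | some p => p
  | none =>
    if paths.any (fun p => PySem.Str.isIn "/todo" p) then "/todos"
    else if paths.any (fun p => PySem.Str.isIn "/task" p) then "/tasks"
    else "/todos"

-- ===== PORT B =====
-- the single loop of Source B: early return on exact match, otherwise accumulate the two flags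
def detectGo : List String → Bool → Bool → String
  | [], has_todo, has_task =>
      if has_todo then "/todos" else if has_task then "/tasks" else "/todos"
  | p :: rest, has_todo, has_task =>
      if p == "/todos" || p == "/tasks" then p
      else detectGo rest (has_todo || PySem.Str.isIn "/todo" p)
                         (has_task || PySem.Str.isIn "/task" p)

def detect_base_path_py_alt (paths : List String) : String :=
  detectGo paths false false

-- ===== PRECONDITION & SPEC =====
def Spec_detect_base_path_py (paths : List String) (out : String) : Prop := out = detect_base_path_py_alt paths
instance (paths : List String) (out : String) : Decidable (Spec_detect_base_path_py paths out) := by unfold Spec_detect_base_path_py; infer_instance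

-- ===== CLAIM (what is proved, stated in full; the proofs are below) =====
def Claim_equal_detect_base_path_py : Prop := ∀ (paths : List String), Dom_detect_base_path_py paths → Spec_detect_base_path_py paths (detect_base_path_py paths)

-- ===== LEMMAS AND PROOFS =====

-- invariant of B's single pass: the flags simply pre-seed the two any() scans
lemma detectGo_eq (paths : List String) : ∀ ht hk : Bool,
    detectGo paths ht hk =
      match paths.find? (fun p => p == "/todos" || p == "/tasks") with
      | some p => p
      | none =>
        if ht || paths.any (fun p => PySem.Str.isIn "/todo" p) then "/todos"
        else if hk || paths.any (fun p => PySem.Str.isIn "/task" p) then "/tasks"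
        else "/todos" := by
  induction paths with
  | nil => intro ht hk; simp [detectGo, List.find?]
  | cons p rest ih =>
    intro ht hk
    by_cases h : (p == "/todos" || p == "/tasks") = true
    · simp [detectGo, List.find?, h]
    · simp only [detectGo, List.find?, h, if_neg, Bool.false_eq_true, not_false_eq_true,
        List.any_cons]
      rw [ih]
      simp [Bool.or_assoc]

-- ===== VERDICT (by name: the statement is the Claim_ definition above) =====
theorem detect_base_path_py_spec : Claim_equal_detect_base_path_py := by
  intro paths _
  unfold Spec_detect_base_path_py detect_base_path_py detect_base_path_py_alt
  rw [detectGo_eq]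
  simp
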